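-- pv_equiv track=rewrite | github.com/jbose038/django-movie-page | recom/crf.py | sent_to_chartags
-- ===== SOURCE A (Python) =====
-- def sent_to_chartags(sent, nonspace='0', space='1'):
--     chars = sent.replace(' ', '')
--     if not chars:
--         return '', []
--     tags = [nonspace]*(len(chars)-1)+[space]
--     idx = 0
--     for c in sent:
--         if c == ' ':
--             tags[idx-1] = space
--         else:
--             idx += 1
--     return chars, tags
-- ===== SOURCE B (Python) =====
-- def sent_to_chartags(sent, nonspace='0', space='1'):
--     chars = sent.replace(' ', '')
--     if not chars:
--         return '', []
--     tags = [space if nxt == ' ' else nonspace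
--             for cur, nxt in zip(sent, sent[1:] + ' ') if cur != ' ']
--     return chars, tags
-- ===== Notes on version B (the rewrite author's own statement) =====
-- stated objective: simpler
-- what changed: A initialises a tag array and mutates it at a running nonspace index while looping over the characters; B emits each tag directly in one comprehension by pairwise lookahead, zipping the sentence with its one-shifted space-padded self, with no mutable state.
import Mathlib
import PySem

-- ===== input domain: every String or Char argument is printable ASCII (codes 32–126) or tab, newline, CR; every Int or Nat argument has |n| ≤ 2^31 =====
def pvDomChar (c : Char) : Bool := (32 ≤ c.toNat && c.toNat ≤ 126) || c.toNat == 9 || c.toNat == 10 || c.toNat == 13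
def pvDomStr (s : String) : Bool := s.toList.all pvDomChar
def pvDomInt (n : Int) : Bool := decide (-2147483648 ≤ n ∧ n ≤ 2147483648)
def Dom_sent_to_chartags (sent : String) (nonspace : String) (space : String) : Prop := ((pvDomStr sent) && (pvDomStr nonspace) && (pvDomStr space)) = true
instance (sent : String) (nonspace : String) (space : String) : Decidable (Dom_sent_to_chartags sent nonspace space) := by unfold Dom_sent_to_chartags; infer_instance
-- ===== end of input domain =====

-- B replaces A's per-char index tracking with in-place tag mutation by a single
-- pairwise lookahead pass (zip of the sentence with its shifted self); objective: simpler.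

-- ===== PORT A =====
-- literal port of A: tags initialised to [nonspace]*(n-1)+[space], then a loop over
-- the characters mutating tags[idx-1] (Python negative-index wrap = pySetD) on spaces
def sent_to_chartags (sent : String) (nonspace : String) (space : String) : String × List String :=
  let chars := PySem.Str.replace sent " " ""
  if chars.toList = [] then ("", [])
  else
    let tags := List.replicate ((PySem.Str.len chars - 1).toNat) nonspace ++ [space]
    let r := sent.toList.foldl
      (fun (st : List String × Int) c =>
        if c = ' ' then (PySem.List.pySetD st.1 (st.2 - 1) space, st.2)
        else (st.1, st.2 + 1))
      (tags, 0)
    (chars, r.1)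

-- ===== PORT B =====
-- literal port of B: one comprehension over zip(sent, sent[1:] + ' '),
-- keeping pairs whose first char is nonspace (filter) and emitting the tag (map)
def sent_to_chartags_alt (sent : String) (nonspace : String) (space : String) : String × List String :=
  let chars := PySem.Str.replace sent " " ""
  if chars.toList = [] then ("", [])
  else
    let tags := ((sent.toList.zip (PySem.List.slice sent.toList (some 1) none ++ [' '])).filter
        (fun p => p.1 ≠ ' ')).map (fun p => if p.2 = ' ' then space else nonspace)
    (chars, tags)

-- ===== PRECONDITION & SPEC =====
def Spec_sent_to_chartags (sent : String) (nonspace : String) (space : String) (out : String × List String) : Prop := out = sent_to_chartags_alt sent nonspace space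
instance (sent : String) (nonspace : String) (space : String) (out : String × List String) : Decidable (Spec_sent_to_chartags sent nonspace space out) := by unfold Spec_sent_to_chartags; infer_instance

-- ===== CLAIM (what is proved, stated in full; the proofs are below) =====
def Claim_equal_sent_to_chartags : Prop := ∀ (sent : String) (nonspace : String) (space : String), Dom_sent_to_chartags sent nonspace space → Spec_sent_to_chartags sent nonspace space (sent_to_chartags sent nonspace space)

-- ===== LEMMAS AND PROOFS =====



-- sent.replace(' ','') removes exactly the spaces
lemma replace_go_space (fuel : Nat) : ∀ (l acc : List Char), l.length ≤ fuel →
    PySem.Chars.replace.go [' '] [] fuel l acc = acc.reverse ++ l.filter (fun c => c ≠ ' ') := by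
  induction fuel with
  | zero =>
    intro l acc h
    have : l = [] := List.eq_nil_of_length_eq_zero (Nat.le_zero.mp h)
    subst this; simp [PySem.Chars.replace.go]
  | succ n ih =>
    intro l acc h
    cases l with
    | nil => simp [PySem.Chars.replace.go]
    | cons c t =>
      by_cases hc : c = ' '
      · subst hc
        have hpre : [' '].isPrefixOf (' ' :: t) = true := by simp [List.isPrefixOf]
        simp only [PySem.Chars.replace.go, hpre, if_pos]
        rw [show List.drop [' '].length (' ' :: t) = t from rfl,
            show ([] : List Char).reverse ++ acc = acc from rfl]
        rw [ih t acc (by simpa using Nat.le_of_succ_le_succ h)]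
        simp
      · have hpre : [' '].isPrefixOf (c :: t) = false := by
          simp only [List.isPrefixOf, Bool.and_eq_true, beq_iff_eq, List.isPrefixOf_nil_left,
            and_true, Bool.eq_false_iff, ne_eq]
          exact fun hh => hc hh.symm
        simp only [PySem.Chars.replace.go, hpre]
        rw [if_neg (by simp)]
        rw [ih t (c :: acc) (by simpa using Nat.le_of_succ_le_succ h)]
        simp [hc]

lemma replace_space_toList (s : String) :
    (PySem.Str.replace s " " "").toList = s.toList.filter (fun c => c ≠ ' ') := by
  show (String.ofList (PySem.Chars.replace s.toList " ".toList "".toList)).toList = _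
  have : PySem.Chars.replace s.toList [' '] [] =
      PySem.Chars.replace.go [' '] [] s.toList.length s.toList [] := by
    simp [PySem.Chars.replace]
  simp only [String.toList_ofList]
  show PySem.Chars.replace s.toList [' '] [] = _
  rw [this, replace_go_space s.toList.length s.toList [] (le_refl _)]
  simp

def tagsB (ns sp : String) : List Char → List String
  | [] => []
  | c :: t => if c = ' ' then tagsB ns sp t
              else (if t.headD ' ' = ' ' then sp else ns) :: tagsB ns sp t

-- B's zip/filter/map comprehension computes tagsB
lemma zip_eq_tagsB (ns sp : String) : ∀ l : List Char,
    ((l.zip (l.drop 1 ++ [' '])).filter (fun p => p.1 ≠ ' ')).map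
        (fun p => if p.2 = ' ' then sp else ns) = tagsB ns sp l := by
  intro l
  induction l with
  | nil => simp [tagsB]
  | cons c t ih =>
    cases t with
    | nil => by_cases hc : c = ' ' <;> simp [tagsB, hc]
    | cons d t' =>
      have h : ((c :: d :: t').zip (((c :: d :: t').drop 1) ++ [' '])) =
          (c, d) :: ((d :: t').zip (((d :: t').drop 1) ++ [' '])) := by simp
      rw [h, List.filter_cons]
      by_cases hc : c = ' '
      · rw [if_neg (by simp [hc])]
        rw [ih]
        simp [tagsB, hc]
      · rw [if_pos (by simp [hc])]
        rw [List.map_cons, ih]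
        simp only [tagsB]
        rw [if_neg hc]
        rfl

-- number of nonspace chars of the suffix still to be processed
def cnt (l : List Char) : Nat := (l.filter (fun c => c ≠ ' ')).length

def mid (ns sp : String) (l : List Char) : List String :=
  if cnt l = 0 then [] else List.replicate (cnt l - 1) ns ++ [sp]

def setL (sp : String) (pre : List String) : List String :=
  if pre = [] then pre else pre.set (pre.length - 1) sp

lemma setL_length (sp : String) (pre : List String) : (setL sp pre).length = pre.length := by
  unfold setL; split <;> simp

lemma setL_idem (sp : String) (pre : List String) : setL sp (setL sp pre) = setL sp pre := by
  unfold setL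
  rcases pre with _ | ⟨x, xs⟩
  · simp
  · simp [List.set_set]

lemma setL_append_singleton (sp : String) (pre : List String) (x : String) :
    setL sp (pre ++ [x]) = pre ++ [sp] := by
  unfold setL
  rw [if_neg (by simp)]
  simp [List.set_append]

lemma write_eq (ns sp : String) (l : List Char) (pre : List String) :
    PySem.List.pySetD (pre ++ mid ns sp l) ((pre.length : Int) - 1) sp = setL sp pre ++ mid ns sp l := by
  rcases pre with _ | ⟨x, xs⟩
  · simp only [List.nil_append, setL, if_pos rfl]
    rw [show ((([] : List String).length : Int) - 1) = -1 by simp]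
    unfold mid
    split
    · simp [PySem.List.pySetD, PySem.List.pySet?, PySem.List.pyIdx?]
    · simp [PySem.List.pySetD, PySem.List.pySet?, PySem.List.pyIdx?]
  · have hlen : (((x :: xs).length : Int) - 1) = (((x :: xs).length - 1 : Nat) : Int) := by
      simp
    rw [hlen, PySem.List.pySetD_natCast]
    rw [List.set_append]
    rw [if_pos (by simp)]
    unfold setL
    rw [if_neg (by simp)]

lemma cnt_cons_space (t : List Char) : cnt (' ' :: t) = cnt t := by simp [cnt]

lemma cnt_cons_nonspace (c : Char) (t : List Char) (hc : c ≠ ' ') :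
    cnt (c :: t) = cnt t + 1 := by simp [cnt, hc]

lemma mid_cons_space (ns sp : String) (t : List Char) :
    mid ns sp (' ' :: t) = mid ns sp t := by
  unfold mid; rw [cnt_cons_space]

lemma mid_cons_nonspace (ns sp : String) (c : Char) (t : List Char) (hc : c ≠ ' ') :
    mid ns sp (c :: t) = (if cnt t = 0 then sp else ns) :: mid ns sp t := by
  unfold mid
  rw [cnt_cons_nonspace c t hc]
  by_cases h0 : cnt t = 0
  · simp [h0]
  · rw [if_neg (by omega), if_neg h0, if_neg h0]
    rcases Nat.exists_eq_succ_of_ne_zero h0 with ⟨k, hk⟩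
    simp [hk, List.replicate_succ]

lemma foldA (ns sp : String) : ∀ (l : List Char) (pre : List String),
    (l.foldl
      (fun (st : List String × Int) c =>
        if c = ' ' then (PySem.List.pySetD st.1 (st.2 - 1) sp, st.2)
        else (st.1, st.2 + 1))
      (pre ++ mid ns sp l, (pre.length : Int))).1
    = (if l.head? = some ' ' then setL sp pre else pre) ++ tagsB ns sp l := by
  intro l
  induction l with
  | nil => intro pre; simp [mid, cnt, tagsB]
  | cons c t ih =>
    intro pre
    rw [List.foldl_cons]
    by_cases hc : c = ' '
    · subst hc
      rw [if_pos rfl]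
      rw [mid_cons_space, write_eq]
      have h := ih (setL sp pre)
      rw [setL_length] at h
      rw [h, setL_idem]
      rw [ite_self]
      rw [if_pos (show (' ' :: t).head? = some ' ' from rfl)]
      congr 1
    · rw [if_neg hc]
      rw [mid_cons_nonspace ns sp c t hc]
      have hre : pre ++ (if cnt t = 0 then sp else ns) :: mid ns sp t
          = (pre ++ [if cnt t = 0 then sp else ns]) ++ mid ns sp t := by simp
      have hlen : (pre.length : Int) + 1 = ((pre ++ [if cnt t = 0 then sp else ns]).length : Int) := by
        simp
      rw [hre, hlen, ih (pre ++ [if cnt t = 0 then sp else ns])]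
      rw [show tagsB ns sp (c :: t) = (if t.headD ' ' = ' ' then sp else ns) :: tagsB ns sp t from by
        simp [tagsB, hc]]
      rcases t with _ | ⟨d, t'⟩
      · rw [if_pos (show cnt ([] : List Char) = 0 from rfl)]
        simp [tagsB, hc]
      · by_cases hd : d = ' '
        · subst hd
          rw [if_pos (show ((' ' :: t').head? = some ' ') from rfl), setL_append_singleton]
          simp [hc]
        · have h0 : cnt (d :: t') ≠ 0 := by rw [cnt_cons_nonspace d t' hd]; omega
          rw [if_neg h0]
          rw [if_neg (show ¬((d :: t').head? = some ' ') by simp [hd])]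
          simp [hc, hd]

-- ===== VERDICT (by name: the statement is the Claim_ definition above) =====
theorem sent_to_chartags_spec : Claim_equal_sent_to_chartags := by
  intro sent nonspace space _
  unfold Spec_sent_to_chartags sent_to_chartags sent_to_chartags_alt
  simp only []
  by_cases hE : (PySem.Str.replace sent " " "").toList = []
  · rw [if_pos hE, if_pos hE]
  · rw [if_neg hE, if_neg hE]
    refine Prod.ext rfl ?_
    show _ = ((sent.toList.zip (PySem.List.slice sent.toList (some 1) none ++ [' '])).filter
        (fun p => p.1 ≠ ' ')).map (fun p => if p.2 = ' ' then space else nonspace)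
    have hslice : PySem.List.slice sent.toList (some 1) none = sent.toList.drop 1 := by
      simp [pysem]
    rw [hslice, zip_eq_tagsB]
    have hchars : (PySem.Str.replace sent " " "").toList = sent.toList.filter (fun c => c ≠ ' ') :=
      replace_space_toList sent
    have hcnt : 0 < cnt sent.toList := by
      rw [hchars] at hE
      unfold cnt
      cases h : (sent.toList.filter (fun c => c ≠ ' ')) with
      | nil => exact absurd h hE
      | cons a l => simp
    have hlen : PySem.Str.len (PySem.Str.replace sent " " "") = (cnt sent.toList : Int) := by
      rw [PySem.Str.len_eq, hchars]; rfl
    have htags : List.replicate ((PySem.Str.len (PySem.Str.replace sent " " "") - 1).toNat) nonspace ++ [space]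
        = mid nonspace space sent.toList := by
      rw [hlen]
      unfold mid
      rw [if_neg (by omega)]
      congr 1
      congr 1
      omega
    rw [htags]
    have := foldA nonspace space sent.toList []
    simp only [List.nil_append, List.length_nil, Nat.cast_zero] at this
    rw [this]
    split <;> simp [setL]
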